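-- pv_equiv track=rewrite | github.com/PalmDr/dreamzero-jax | src/dreamzero_jax/utils/hf_download.py | _pick_checkpoint_file
-- ===== SOURCE A (Python) =====
-- def _pick_checkpoint_file(files: list[str]) -> str | None:
--     """Pick the best checkpoint file from a list of repo files."""
--     for suffix in (".safetensors", ".bin", ".pt", ".pth"):
--         matches = [f for f in files if f.endswith(suffix)]
--         if not matches:
--             continue
--
--         if suffix == ".safetensors":
--             index = [f for f in matches if "index" in f.lower()]
--             if index:
--                 return index[0]
--
--         if len(matches) == 1:
--             return matches[0]
--         model_files = [f for f in matches if "model" in f.lower()]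
--         return model_files[0] if model_files else matches[0]
--
--     return None
-- ===== SOURCE B (Python) =====
-- def _pick_checkpoint_file(files: list[str]) -> str | None:
--     """Pick the best checkpoint file: one pass, minimal (suffix_rank, sub_rank) key, first wins ties."""
--     suffixes = (".safetensors", ".bin", ".pt", ".pth")
--     best_key = None
--     best_file = None
--     for f in files:
--         rank = next((i for i, s in enumerate(suffixes) if f.endswith(s)), None)
--         if rank is None:
--             continue
--         low = f.lower()
--         if rank == 0:
--             sub = 0 if "index" in low else 1 if "model" in low else 2
--         else:
--             sub = 0 if "model" in low else 1
--         key = (rank, sub)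
--         if best_key is None or key < best_key:
--             best_key, best_file = key, f
--     return best_file
-- ===== Notes on version B (the rewrite author's own statement) =====
-- stated objective: alternative
-- what changed: Replaces the suffix-by-suffix nested filter passes with early returns by a single pass over the files that assigns each matching file a (suffix_rank, sub_rank) key and keeps the first file with the strictly minimal key.
import Mathlib
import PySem

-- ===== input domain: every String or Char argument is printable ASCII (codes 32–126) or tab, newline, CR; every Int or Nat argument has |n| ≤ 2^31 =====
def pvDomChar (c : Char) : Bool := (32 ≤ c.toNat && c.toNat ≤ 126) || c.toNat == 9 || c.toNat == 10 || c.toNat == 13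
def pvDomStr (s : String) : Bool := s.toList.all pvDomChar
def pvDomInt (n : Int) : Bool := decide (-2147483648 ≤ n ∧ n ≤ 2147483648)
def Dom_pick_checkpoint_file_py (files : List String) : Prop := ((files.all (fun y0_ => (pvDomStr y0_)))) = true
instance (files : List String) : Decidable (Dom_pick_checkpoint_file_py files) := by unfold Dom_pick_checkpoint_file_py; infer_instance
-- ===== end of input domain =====

-- B replaces A's suffix-by-suffix filter passes by a single pass over the files keeping the
-- file with the minimal (suffix_rank, sub_rank) key (first wins ties); return values proved equal.

-- ===== PORT A =====
-- "index" in f.lower() / "model" in f.lower()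
def pvHasIndex (f : String) : Bool := PySem.Str.isIn "index" (PySem.Str.lower f)
def pvHasModel (f : String) : Bool := PySem.Str.isIn "model" (PySem.Str.lower f)

-- the body of A's 'for suffix in (...)' loop, recursing on the remaining suffixes
def pickLoop (files : List String) : List String → Option String
  | [] => none
  | suffix :: rest =>
    let ms := files.filter (fun f => PySem.Str.endswith f suffix)
    if ms = [] then pickLoop files rest
    else
      match (if suffix = ".safetensors" then ms.filter pvHasIndex else []).head? with
      | some g => some g
      | none =>
        if ms.length = 1 then ms.head?
        else
          let model := ms.filter pvHasModel
          if model = [] then ms.head? else model.head?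

def pick_checkpoint_file_py (files : List String) : Option String :=
  pickLoop files [".safetensors", ".bin", ".pt", ".pth"]

-- ===== PORT B =====
-- first i with f.endswith(suffixes[i]), as in Source B's next(...)
def altRank? (f : String) : Option Nat :=
  if PySem.Str.endswith f ".safetensors" then some 0
  else if PySem.Str.endswith f ".bin" then some 1
  else if PySem.Str.endswith f ".pt" then some 2
  else if PySem.Str.endswith f ".pth" then some 3
  else none

def altSub (f : String) (rank : Nat) : Nat :=
  if rank = 0 then
    if pvHasIndex f then 0 else if pvHasModel f then 1 else 2
  else
    if pvHasModel f then 0 else 1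

-- Python tuple comparison 'key < best_key' on (rank, sub)
def keyLt (a b : Nat × Nat) : Bool := decide (a.1 < b.1 ∨ (a.1 = b.1 ∧ a.2 < b.2))

def altStep (best : Option ((Nat × Nat) × String)) (f : String) : Option ((Nat × Nat) × String) :=
  match altRank? f with
  | none => best
  | some r =>
    let key := (r, altSub f r)
    match best with
    | none => some (key, f)
    | some (bk, bf) => if keyLt key bk then some (key, f) else some (bk, bf)

def pick_checkpoint_file_py_alt (files : List String) : Option String :=
  (files.foldl altStep none).map Prod.snd

-- ===== PRECONDITION & SPEC =====
def Spec_pick_checkpoint_file_py (files : List String) (out : Option String) : Prop := out = pick_checkpoint_file_py_alt files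
instance (files : List String) (out : Option String) : Decidable (Spec_pick_checkpoint_file_py files out) := by unfold Spec_pick_checkpoint_file_py; infer_instance

-- ===== CLAIM (what is proved, stated in full; the proofs are below) =====
def Claim_equal_pick_checkpoint_file_py : Prop := ∀ (files : List String), Dom_pick_checkpoint_file_py files → Spec_pick_checkpoint_file_py files (pick_checkpoint_file_py files)

-- ===== LEMMAS AND PROOFS =====

-- the key Source B assigns to a file (none = no suffix matches)
def key? (f : String) : Option (Nat × Nat) := (altRank? f).map (fun r => (r, altSub f r))

-- "first file with minimal key", as a structural recursion (both ports reduce to this)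
def selK : List String → Option ((Nat × Nat) × String)
  | [] => none
  | f :: rest =>
    match key? f, selK rest with
    | none, r => r
    | some k, none => some (k, f)
    | some k, some (k', g) => if keyLt k' k then some (k', g) else some (k, f)

theorem keyLt_iff (a b : Nat × Nat) : keyLt a b = true ↔ (a.1 < b.1 ∨ (a.1 = b.1 ∧ a.2 < b.2)) := by
  simp [keyLt]

theorem altStep_eq (best : Option ((Nat × Nat) × String)) (f : String) :
    altStep best f = match key? f, best with
      | none, b => b
      | some k, none => some (k, f)
      | some k, some (bk, bf) => if keyLt k bk then some (k, f) else some (bk, bf) := by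
  unfold altStep key?
  cases altRank? f <;> cases best <;> simp

theorem foldl_altStep_some (files : List String) (k : Nat × Nat) (g : String) :
    files.foldl altStep (some (k, g)) =
      match selK files with
      | none => some (k, g)
      | some (k', g') => if keyLt k' k then some (k', g') else some (k, g) := by
  induction files generalizing k g with
  | nil => simp [selK]
  | cons f rest ih =>
    simp only [List.foldl_cons, altStep_eq, selK]
    cases hf : key? f with
    | none =>
      simpa using ih k g
    | some kf =>
      by_cases hlt : keyLt kf k = true
      · simp only [hlt, if_pos, ih]
        cases hr : selK rest with
        | none => simp [hlt]
        | some p =>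
          obtain ⟨k', g'⟩ := p
          by_cases h1 : keyLt k' kf = true
          · have h2 : keyLt k' k = true := by rw [keyLt_iff] at *; omega
            simp [h1, h2]
          · have h1' : keyLt k' kf = false := by simp_all
            simp [h1', hlt]
      · have hlt' : keyLt kf k = false := by simp_all
        simp only [hlt', Bool.false_eq_true, if_false, ih]
        cases hr : selK rest with
        | none => simp [hlt']
        | some p =>
          obtain ⟨k', g'⟩ := p
          by_cases h1 : keyLt k' kf = true
          · simp [h1]
          · have h1' : keyLt k' kf = false := by simp_all
            have h2 : keyLt k' k = false := by
              rw [keyLt_iff] at hlt h1; rw [← Bool.not_eq_true, keyLt_iff]; omega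
            simp [h1', h2, hlt']

theorem foldl_altStep_none (files : List String) :
    files.foldl altStep none = selK files := by
  cases files with
  | nil => simp [selK]
  | cons f rest =>
    simp only [List.foldl_cons, altStep_eq, selK]
    cases hf : key? f with
    | none => exact foldl_altStep_none rest |>.trans (by cases selK rest <;> simp)
    | some kf =>
      rw [foldl_altStep_some]
      cases selK rest <;> simp

theorem selK_none_iff (files : List String) :
    selK files = none ↔ ∀ f ∈ files, key? f = none := by
  induction files with
  | nil => simp [selK]
  | cons f rest ih =>
    simp only [selK, List.mem_cons]
    cases hf : key? f with
    | none =>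
      simp only [ih]
      constructor
      · rintro h g (rfl | hg); exact hf; exact h g hg
      · intro h g hg; exact h g (Or.inr hg)
    | some kf =>
      have hR : ¬ (∀ g, g = f ∨ g ∈ rest → key? g = none) := by
        intro h; simp [h f (Or.inl rfl)] at hf
      cases hr : selK rest with
      | none => exact iff_of_false (by simp) hR
      | some p => exact iff_of_false (by obtain ⟨k',g'⟩ := p; simp only []; split_ifs <;> simp) hR

theorem keyLt_asymm_cases (a b : Nat × Nat) :
    keyLt a b = true ∨ a = b ∨ keyLt b a = true := by
  obtain ⟨a1, a2⟩ := a; obtain ⟨b1, b2⟩ := b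
  simp only [keyLt_iff, Prod.mk.injEq]; omega


theorem keyLt_trans {a b c : Nat × Nat} (h1 : keyLt a b = true) (h2 : keyLt b c = true) :
    keyLt a c = true := by
  obtain ⟨a1, a2⟩ := a; obtain ⟨b1, b2⟩ := b; obtain ⟨c1, c2⟩ := c
  simp only [keyLt_iff] at *; omega

theorem keyLt_ne {a b : Nat × Nat} (h : keyLt a b = true) : a ≠ b := by
  obtain ⟨a1, a2⟩ := a; obtain ⟨b1, b2⟩ := b
  intro he; injection he with e1 e2; subst e1; subst e2
  simp only [keyLt_iff] at h; omega

theorem filterKey_cons_ne {f : String} {rest : List String} {kf k' : Nat × Nat}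
    (hf : key? f = some kf) (h : kf ≠ k') :
    (f :: rest).filter (fun x => key? x == some k') = rest.filter (fun x => key? x == some k') := by
  simp [List.filter_cons, hf, h]

theorem filterKey_cons_eq {f : String} {rest : List String} {kf : Nat × Nat}
    (hf : key? f = some kf) :
    (f :: rest).filter (fun x => key? x == some kf) = f :: rest.filter (fun x => key? x == some kf) := by
  simp [List.filter_cons, hf]

theorem selK_some_iff : ∀ (files : List String) (k : Nat × Nat) (g : String),
    selK files = some (k, g) ↔
      ((files.filter (fun f => key? f == some k)).head? = some g ∧
        ∀ k', keyLt k' k = true → files.filter (fun f => key? f == some k') = [])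
  | [], k, g => by simp [selK]
  | f :: rest, k, g => by
    cases hf : key? f with
    | none =>
      have hcond : ∀ k' : Nat × Nat, (key? f == some k') = false := by simp [hf]
      simp only [selK, hf, List.filter_cons, hcond, Bool.false_eq_true, if_false]
      exact selK_some_iff rest k g
    | some kf =>
      obtain ⟨kf1, kf2⟩ := kf
      obtain ⟨k1, k2⟩ := k
      simp only [selK, hf]
      cases hr : selK rest with
      | none =>
        dsimp only
        have hall := (selK_none_iff rest).1 hr
        have hfl : ∀ k' : Nat × Nat, rest.filter (fun x => key? x == some k') = [] := by
          intro k'; rw [List.filter_eq_nil_iff]; intro a ha; simp [hall a ha]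
        by_cases hk : ((kf1, kf2) : Nat × Nat) = (k1, k2)
        · constructor
          · intro h
            simp only [Option.some.injEq, Prod.mk.injEq] at h
            obtain ⟨⟨rfl, rfl⟩, rfl⟩ := h
            refine ⟨by rw [filterKey_cons_eq hf]; rfl, ?_⟩
            intro k' hlt'
            rw [filterKey_cons_ne hf fun hh => keyLt_ne hlt' hh.symm, hfl]
          · rintro ⟨h1, -⟩
            rw [← hk, filterKey_cons_eq hf] at h1
            injection h1 with h1
            simp [hk, h1]
        · refine iff_of_false ?_ ?_
          · intro h; injection h with h1; injection h1 with h2 _; exact hk h2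
          · rintro ⟨h1, -⟩
            rw [filterKey_cons_ne hf hk, hfl] at h1
            cases h1
      | some p =>
        obtain ⟨⟨p1, p2⟩, g0⟩ := p
        dsimp only
        have hih := (selK_some_iff rest (p1, p2) g0).1 hr
        by_cases hlt : keyLt (p1, p2) (kf1, kf2) = true
        · rw [if_pos hlt]
          have hkfne : ((kf1, kf2) : Nat × Nat) ≠ (p1, p2) := fun h => keyLt_ne hlt h.symm
          constructor
          · intro h
            simp only [Option.some.injEq, Prod.mk.injEq] at h
            obtain ⟨⟨rfl, rfl⟩, rfl⟩ := h
            refine ⟨?_, ?_⟩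
            · rw [filterKey_cons_ne hf hkfne]; exact hih.1
            · intro k' hlt'
              rw [filterKey_cons_ne hf fun hh => keyLt_ne (keyLt_trans hlt' hlt) hh.symm]
              exact hih.2 k' hlt'
          · rintro ⟨h1, h2⟩
            rcases keyLt_asymm_cases (k1, k2) (p1, p2) with hc | hc | hc
            · exfalso
              rw [filterKey_cons_ne hf fun hh => keyLt_ne (keyLt_trans hc hlt) hh.symm,
                hih.2 (k1, k2) hc] at h1
              cases h1
            · rw [filterKey_cons_ne hf (hc ▸ hkfne), hc, hih.1] at h1
              injection h1 with h1
              rw [hc, h1]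
            · exfalso
              have h3 := h2 (p1, p2) hc
              rw [filterKey_cons_ne hf hkfne] at h3
              rw [h3] at hih
              cases hih.1
        · rw [if_neg hlt]
          constructor
          · intro h
            simp only [Option.some.injEq, Prod.mk.injEq] at h
            obtain ⟨⟨rfl, rfl⟩, rfl⟩ := h
            refine ⟨?_, ?_⟩
            · rw [filterKey_cons_eq hf]; rfl
            · intro k' hlt'
              rw [filterKey_cons_ne hf fun hh => keyLt_ne hlt' hh.symm]
              refine hih.2 k' ?_
              rcases keyLt_asymm_cases (p1, p2) (kf1, kf2) with hc | hc | hc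
              · exact absurd hc hlt
              · exact hc ▸ hlt'
              · exact keyLt_trans hlt' hc
          · rintro ⟨h1, h2⟩
            rcases keyLt_asymm_cases ((k1, k2) : Nat × Nat) (kf1, kf2) with hc | hc | hc
            · exfalso
              rw [filterKey_cons_ne hf fun hh => keyLt_ne hc hh.symm] at h1
              rcases keyLt_asymm_cases ((k1, k2) : Nat × Nat) (p1, p2) with hd | hd | hd
              · rw [hih.2 (k1, k2) hd] at h1; cases h1
              · exact absurd (hd ▸ hc) hlt
              · have h3 := h2 (p1, p2) hd
                by_cases hkp : ((kf1, kf2) : Nat × Nat) = (p1, p2)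
                · rw [← hkp, filterKey_cons_eq hf] at h3; cases h3
                · rw [filterKey_cons_ne hf hkp] at h3
                  rw [h3] at hih; cases hih.1
            · rw [hc, filterKey_cons_eq hf] at h1
              injection h1 with h1
              rw [hc, h1]
            · exfalso
              have h3 := h2 (kf1, kf2) hc
              rw [filterKey_cons_eq hf] at h3
              cases h3

theorem ends_excl {s t : String} (f : String) (h : PySem.Str.endswith f s = true)
    (hst : ¬ (s.toList <:+ t.toList)) (hts : ¬ (t.toList <:+ s.toList)) :
    PySem.Str.endswith f t = false := by
  by_contra hc
  rw [Bool.not_eq_false] at hc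
  have h1 : s.toList <:+ f.toList := by simpa [PySem.Chars.endswith_iff] using h
  have h2 : t.toList <:+ f.toList := by simpa [PySem.Chars.endswith_iff] using hc
  rcases List.suffix_or_suffix_of_suffix h1 h2 with h3 | h3
  exacts [hst h3, hts h3]

theorem e1_not_e0 (f : String) (h : PySem.Str.endswith f ".bin" = true) :
    PySem.Str.endswith f ".safetensors" = false := ends_excl f h (by decide) (by decide)
theorem e2_not_e0 (f : String) (h : PySem.Str.endswith f ".pt" = true) :
    PySem.Str.endswith f ".safetensors" = false := ends_excl f h (by decide) (by decide)
theorem e2_not_e1 (f : String) (h : PySem.Str.endswith f ".pt" = true) :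
    PySem.Str.endswith f ".bin" = false := ends_excl f h (by decide) (by decide)
theorem e3_not_e0 (f : String) (h : PySem.Str.endswith f ".pth" = true) :
    PySem.Str.endswith f ".safetensors" = false := ends_excl f h (by decide) (by decide)
theorem e3_not_e1 (f : String) (h : PySem.Str.endswith f ".pth" = true) :
    PySem.Str.endswith f ".bin" = false := ends_excl f h (by decide) (by decide)
theorem e3_not_e2 (f : String) (h : PySem.Str.endswith f ".pth" = true) :
    PySem.Str.endswith f ".pt" = false := ends_excl f h (by decide) (by decide)

theorem key00 (f : String) :
    (key? f == some ((0 : Nat), (0 : Nat))) = (pvHasIndex f && PySem.Str.endswith f ".safetensors") := by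
  unfold key? altRank? altSub
  cases h0 : PySem.Str.endswith f ".safetensors"
  · split_ifs <;> simp_all
  · cases hi : pvHasIndex f <;> simp [hi] <;> split_ifs <;> simp

theorem key01 (f : String) :
    (key? f == some ((0 : Nat), (1 : Nat))) = ((!pvHasIndex f && pvHasModel f) && PySem.Str.endswith f ".safetensors") := by
  unfold key? altRank? altSub
  cases h0 : PySem.Str.endswith f ".safetensors"
  · split_ifs <;> simp_all
  · cases hi : pvHasIndex f <;> cases hm : pvHasModel f <;> simp [hi, hm]

theorem key02 (f : String) :
    (key? f == some ((0 : Nat), (2 : Nat))) = ((!pvHasIndex f && !pvHasModel f) && PySem.Str.endswith f ".safetensors") := by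
  unfold key? altRank? altSub
  cases h0 : PySem.Str.endswith f ".safetensors"
  · split_ifs <;> simp_all
  · cases hi : pvHasIndex f <;> cases hm : pvHasModel f <;> simp [hi, hm]

theorem key10 (f : String) :
    (key? f == some ((1 : Nat), (0 : Nat))) = (pvHasModel f && PySem.Str.endswith f ".bin") := by
  unfold key? altRank? altSub
  cases h1 : PySem.Str.endswith f ".bin"
  · split_ifs <;> simp_all
  · simp only [e1_not_e0 f h1]
    cases hm : pvHasModel f <;> simp [hm]

theorem key11 (f : String) :
    (key? f == some ((1 : Nat), (1 : Nat))) = (!pvHasModel f && PySem.Str.endswith f ".bin") := by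
  unfold key? altRank? altSub
  cases h1 : PySem.Str.endswith f ".bin"
  · split_ifs <;> simp_all
  · simp only [e1_not_e0 f h1]
    cases hm : pvHasModel f <;> simp [hm]

theorem key20 (f : String) :
    (key? f == some ((2 : Nat), (0 : Nat))) = (pvHasModel f && PySem.Str.endswith f ".pt") := by
  unfold key? altRank? altSub
  cases h2 : PySem.Str.endswith f ".pt"
  · split_ifs <;> simp_all
  · simp only [e2_not_e0 f h2, e2_not_e1 f h2]
    cases hm : pvHasModel f <;> simp [hm]

theorem key21 (f : String) :
    (key? f == some ((2 : Nat), (1 : Nat))) = (!pvHasModel f && PySem.Str.endswith f ".pt") := by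
  unfold key? altRank? altSub
  cases h2 : PySem.Str.endswith f ".pt"
  · split_ifs <;> simp_all
  · simp only [e2_not_e0 f h2, e2_not_e1 f h2]
    cases hm : pvHasModel f <;> simp [hm]

theorem key30 (f : String) :
    (key? f == some ((3 : Nat), (0 : Nat))) = (pvHasModel f && PySem.Str.endswith f ".pth") := by
  unfold key? altRank? altSub
  cases h3 : PySem.Str.endswith f ".pth"
  · split_ifs <;> simp_all
  · simp only [e3_not_e0 f h3, e3_not_e1 f h3, e3_not_e2 f h3]
    cases hm : pvHasModel f <;> simp [hm]

theorem key31 (f : String) :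
    (key? f == some ((3 : Nat), (1 : Nat))) = (!pvHasModel f && PySem.Str.endswith f ".pth") := by
  unfold key? altRank? altSub
  cases h3 : PySem.Str.endswith f ".pth"
  · split_ifs <;> simp_all
  · simp only [e3_not_e0 f h3, e3_not_e1 f h3, e3_not_e2 f h3]
    cases hm : pvHasModel f <;> simp [hm]

theorem filter_key_nil_0 (files : List String)
    (h : files.filter (fun f => PySem.Str.endswith f ".safetensors") = []) (b : Nat) :
    files.filter (fun f => key? f == some (0, b)) = [] := by
  simp only [List.filter_eq_nil_iff] at h ⊢
  intro a ha hk
  refine h a ha ?_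
  rw [beq_iff_eq] at hk
  unfold key? altRank? at hk
  split_ifs at hk <;> simp_all

theorem filter_key_nil_1 (files : List String)
    (h : files.filter (fun f => PySem.Str.endswith f ".bin") = []) (b : Nat) :
    files.filter (fun f => key? f == some (1, b)) = [] := by
  simp only [List.filter_eq_nil_iff] at h ⊢
  intro a ha hk
  refine h a ha ?_
  rw [beq_iff_eq] at hk
  unfold key? altRank? at hk
  split_ifs at hk <;> simp_all

theorem filter_key_nil_2 (files : List String)
    (h : files.filter (fun f => PySem.Str.endswith f ".pt") = []) (b : Nat) :
    files.filter (fun f => key? f == some (2, b)) = [] := by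
  simp only [List.filter_eq_nil_iff] at h ⊢
  intro a ha hk
  refine h a ha ?_
  rw [beq_iff_eq] at hk
  unfold key? altRank? at hk
  split_ifs at hk <;> simp_all

theorem head?_of_ne_nil (l : List String) (h : l ≠ []) : ∃ x, l.head? = some x := by
  cases l with
  | nil => exact absurd rfl h
  | cons a t => exact ⟨a, rfl⟩

theorem body_model (files : List String) (er : String → Bool) (r : Nat)
    (hK0 : ∀ f, (key? f == some (r, 0)) = (pvHasModel f && er f))
    (hK1 : ∀ f, (key? f == some (r, 1)) = (!pvHasModel f && er f))
    (hlow : ∀ a b : Nat, a < r → files.filter (fun f => key? f == some (a, b)) = [])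
    (hm : files.filter er ≠ []) :
    (if (files.filter er).length = 1 then (files.filter er).head?
     else if (files.filter er).filter pvHasModel = [] then (files.filter er).head?
     else ((files.filter er).filter pvHasModel).head?) = (selK files).map Prod.snd := by
  have hfil0 : files.filter (fun f => key? f == some (r, 0)) = (files.filter er).filter pvHasModel := by
    calc files.filter (fun f => key? f == some (r, 0))
        = files.filter (fun f => pvHasModel f && er f) := List.filter_congr (fun a _ => hK0 a)
      _ = (files.filter er).filter pvHasModel := List.filter_filter.symm
  have hfil1 : files.filter (fun f => key? f == some (r, 1)) = (files.filter er).filter (fun f => !pvHasModel f) := by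
    calc files.filter (fun f => key? f == some (r, 1))
        = files.filter (fun f => !pvHasModel f && er f) := List.filter_congr (fun a _ => hK1 a)
      _ = _ := List.filter_filter.symm
  by_cases hmod : (files.filter er).filter pvHasModel = []
  · obtain ⟨x, hx⟩ := head?_of_ne_nil _ hm
    have hnomodel : ∀ a ∈ files.filter er, pvHasModel a = false := by
      intro a ha
      have := List.filter_eq_nil_iff.1 hmod a ha
      simpa using this
    have hfil1' : files.filter (fun f => key? f == some (r, 1)) = files.filter er := by
      rw [hfil1]
      refine List.filter_eq_self.2 ?_
      intro a ha; simp [hnomodel a ha]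
    have hsel : selK files = some ((r, 1), x) := by
      refine (selK_some_iff files (r, 1) x).2 ⟨by rw [hfil1', hx], ?_⟩
      rintro ⟨a, b⟩ hlt
      rw [keyLt_iff] at hlt; dsimp only at hlt
      rcases Nat.lt_or_ge a r with hc | hc
      · exact hlow a b hc
      · have : a = r ∧ b = 0 := by omega
        obtain ⟨rfl, rfl⟩ := this
        rw [hfil0]; exact hmod
    rw [hsel]
    split_ifs <;> simp [hx]
  · obtain ⟨y, hy⟩ := head?_of_ne_nil _ hmod
    have hsel : selK files = some ((r, 0), y) := by
      refine (selK_some_iff files (r, 0) y).2 ⟨by rw [hfil0, hy], ?_⟩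
      rintro ⟨a, b⟩ hlt
      rw [keyLt_iff] at hlt; dsimp only at hlt
      exact hlow a b (by omega)
    rw [hsel]
    by_cases hlen : (files.filter er).length = 1
    · obtain ⟨x, hxx⟩ := List.length_eq_one_iff.1 hlen
      rw [hxx] at hmod hy ⊢
      cases hmx : pvHasModel x
      · simp [hmx] at hmod
      · have hfx : [x].filter pvHasModel = [x] := by simp [hmx]
        rw [hfx] at hy
        injection hy with hy
        simp [hy]
    · rw [if_neg hlen, if_neg hmod, hy]
      rfl

theorem pickA_eq (files : List String) :
    pick_checkpoint_file_py files = (selK files).map Prod.snd := by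
  unfold pick_checkpoint_file_py
  simp only [pickLoop]
  by_cases h0 : files.filter (fun f => PySem.Str.endswith f ".safetensors") = []
  case neg =>
    rw [if_neg h0, if_pos trivial]
    have hfil00 : files.filter (fun f => key? f == some (0, 0)) =
        (files.filter (fun f => PySem.Str.endswith f ".safetensors")).filter pvHasIndex := by
      calc files.filter (fun f => key? f == some (0, 0))
          = files.filter (fun f => pvHasIndex f && PySem.Str.endswith f ".safetensors") :=
            List.filter_congr (fun a _ => key00 a)
        _ = _ := List.filter_filter.symm
    by_cases hidx : (files.filter (fun f => PySem.Str.endswith f ".safetensors")).filter pvHasIndex = []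
    · rw [hidx]
      simp only [List.head?_nil]
      have hidxmem : ∀ a ∈ files.filter (fun f => PySem.Str.endswith f ".safetensors"), pvHasIndex a = false := by
        intro a ha
        have := List.filter_eq_nil_iff.1 hidx a ha
        simpa using this
      have hfil01 : files.filter (fun f => key? f == some (0, 1)) =
          (files.filter (fun f => PySem.Str.endswith f ".safetensors")).filter pvHasModel := by
        calc files.filter (fun f => key? f == some (0, 1))
            = files.filter (fun f => (!pvHasIndex f && pvHasModel f) && PySem.Str.endswith f ".safetensors") :=
              List.filter_congr (fun a _ => key01 a)
          _ = (files.filter (fun f => PySem.Str.endswith f ".safetensors")).filter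
                (fun f => !pvHasIndex f && pvHasModel f) := List.filter_filter.symm
          _ = _ := List.filter_congr (fun a ha => by simp [hidxmem a ha])
      by_cases hmod : (files.filter (fun f => PySem.Str.endswith f ".safetensors")).filter pvHasModel = []
      · have hnom : ∀ a ∈ files.filter (fun f => PySem.Str.endswith f ".safetensors"), pvHasModel a = false := by
          intro a ha
          have := List.filter_eq_nil_iff.1 hmod a ha
          simpa using this
        have hfil02 : files.filter (fun f => key? f == some (0, 2)) =
            files.filter (fun f => PySem.Str.endswith f ".safetensors") := by
          calc files.filter (fun f => key? f == some (0, 2))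
              = files.filter (fun f => (!pvHasIndex f && !pvHasModel f) && PySem.Str.endswith f ".safetensors") :=
                List.filter_congr (fun a _ => key02 a)
            _ = (files.filter (fun f => PySem.Str.endswith f ".safetensors")).filter
                  (fun f => !pvHasIndex f && !pvHasModel f) := List.filter_filter.symm
            _ = _ := List.filter_eq_self.2 (fun a ha => by simp [hidxmem a ha, hnom a ha])
        obtain ⟨x, hx⟩ := head?_of_ne_nil _ h0
        have hsel : selK files = some ((0, 2), x) := by
          refine (selK_some_iff files (0, 2) x).2 ⟨by rw [hfil02, hx], ?_⟩
          rintro ⟨a, b⟩ hlt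
          rw [keyLt_iff] at hlt; dsimp only at hlt
          have hab : a = 0 ∧ (b = 0 ∨ b = 1) := by omega
          obtain ⟨rfl, hb | hb⟩ := hab <;> subst hb
          · rw [hfil00]; exact hidx
          · rw [hfil01]; exact hmod
        rw [hsel]
        split_ifs <;> (rw [hx]; rfl)
      · obtain ⟨y, hy⟩ := head?_of_ne_nil _ hmod
        have hsel : selK files = some ((0, 1), y) := by
          refine (selK_some_iff files (0, 1) y).2 ⟨by rw [hfil01, hy], ?_⟩
          rintro ⟨a, b⟩ hlt
          rw [keyLt_iff] at hlt; dsimp only at hlt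
          have hab : a = 0 ∧ b = 0 := by omega
          obtain ⟨rfl, rfl⟩ := hab
          rw [hfil00]; exact hidx
        rw [hsel]
        by_cases hlen : (files.filter (fun f => PySem.Str.endswith f ".safetensors")).length = 1
        · obtain ⟨x, hxx⟩ := List.length_eq_one_iff.1 hlen
          rw [hxx] at hmod hy ⊢
          cases hmx : pvHasModel x
          · simp [hmx] at hmod
          · have hfx : [x].filter pvHasModel = [x] := by simp [hmx]
            rw [hfx] at hy
            injection hy with hy
            simp [hy]
        · rw [if_neg hlen, if_neg hmod, hy]
          rfl
    · obtain ⟨z, hz⟩ := head?_of_ne_nil _ hidx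
      rw [hz]
      have hsel : selK files = some ((0, 0), z) := by
        refine (selK_some_iff files (0, 0) z).2 ⟨by rw [hfil00, hz], ?_⟩
        rintro ⟨a, b⟩ hlt
        rw [keyLt_iff] at hlt; dsimp only at hlt
        rcases hlt with h | h <;> omega
      rw [hsel]
      rfl
  case pos =>
    rw [if_pos h0]
    by_cases h1 : files.filter (fun f => PySem.Str.endswith f ".bin") = []
    case neg =>
      rw [if_neg h1, if_neg (show ¬(".bin" = ".safetensors") from by decide)]
      simp only [List.head?_nil]
      refine body_model files _ 1 key10 key11 ?_ h1
      intro a b hab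
      have : a = 0 := by omega
      subst this
      exact filter_key_nil_0 files h0 b
    case pos =>
      rw [if_pos h1]
      by_cases h2 : files.filter (fun f => PySem.Str.endswith f ".pt") = []
      case neg =>
        rw [if_neg h2, if_neg (show ¬(".pt" = ".safetensors") from by decide)]
        simp only [List.head?_nil]
        refine body_model files _ 2 key20 key21 ?_ h2
        intro a b hab
        have : a = 0 ∨ a = 1 := by omega
        rcases this with rfl | rfl
        · exact filter_key_nil_0 files h0 b
        · exact filter_key_nil_1 files h1 b
      case pos =>
        rw [if_pos h2]
        by_cases h3 : files.filter (fun f => PySem.Str.endswith f ".pth") = []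
        case neg =>
          rw [if_neg h3, if_neg (show ¬(".pth" = ".safetensors") from by decide)]
          simp only [List.head?_nil]
          refine body_model files _ 3 key30 key31 ?_ h3
          intro a b hab
          have : a = 0 ∨ a = 1 ∨ a = 2 := by omega
          rcases this with rfl | rfl | rfl
          · exact filter_key_nil_0 files h0 b
          · exact filter_key_nil_1 files h1 b
          · exact filter_key_nil_2 files h2 b
        case pos =>
          rw [if_pos h3]
          have hsel : selK files = none := by
            refine (selK_none_iff files).2 ?_
            intro f hf
            have e0 := List.filter_eq_nil_iff.1 h0 f hf
            have e1 := List.filter_eq_nil_iff.1 h1 f hf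
            have e2 := List.filter_eq_nil_iff.1 h2 f hf
            have e3 := List.filter_eq_nil_iff.1 h3 f hf
            unfold key? altRank?
            split_ifs <;> simp_all
          rw [hsel]
          rfl

-- ===== VERDICT (by name: the statement is the Claim_ definition above) =====
theorem pick_checkpoint_file_py_spec : Claim_equal_pick_checkpoint_file_py := by
  intro files _
  unfold Spec_pick_checkpoint_file_py pick_checkpoint_file_py_alt
  rw [foldl_altStep_none, pickA_eq]
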